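-- pv_equiv track=rewrite | github.com/sabosabo7/prog | atcoder/past1/H.py | yn2num
-- ===== SOURCE A (Python) =====
-- def yn2num(s):
--     k = 0
--     idx = 0
--     for t in s:
--         if t == "Y":
--             idx = idx + 2 ** k
--         k = k + 1
--     return idx
-- ===== SOURCE B (Python) =====
-- def yn2num(s):
--     return int('0' + ''.join('1' if c == 'Y' else '0' for c in reversed(s)), 2)
-- ===== Notes on version B (the rewrite author's own statement) =====
-- stated objective: idiomatic
-- what changed: Replaces the manual loop summing 2**k with building the reversed binary digit string and a single base-2 int() parse (leading '0' makes the empty string yield 0).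
import Mathlib
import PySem

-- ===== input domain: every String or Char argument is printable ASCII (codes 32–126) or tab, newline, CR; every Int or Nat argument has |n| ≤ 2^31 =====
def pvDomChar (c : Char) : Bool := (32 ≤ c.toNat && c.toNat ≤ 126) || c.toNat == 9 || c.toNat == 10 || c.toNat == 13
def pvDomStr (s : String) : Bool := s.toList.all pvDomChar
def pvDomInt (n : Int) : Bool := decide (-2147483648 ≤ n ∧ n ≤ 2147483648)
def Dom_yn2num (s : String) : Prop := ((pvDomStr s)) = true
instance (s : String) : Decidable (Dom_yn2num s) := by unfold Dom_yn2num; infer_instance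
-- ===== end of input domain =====

-- B builds the reversed binary digit string and parses it in one base-2 pass, instead of A's loop summing 2**k (idiomatic rewrite, same cost).


-- ===== PORT A =====
-- loop: for t in s: if t == 'Y': idx += 2 ** k; k += 1
def yn2num (s : String) : Int :=
  (s.toList.foldl
    (fun (st : Int × Int) t =>
      (st.1 + 1, if t = 'Y' then st.2 + 2 ^ st.1.toNat else st.2))
    (0, 0)).2

-- ===== PORT B =====
-- the generator expression: each char of reversed(s) mapped to '1'/'0'
def ynDigits (s : String) : List Char :=
  s.toList.reverse.map (fun c => if c = 'Y' then '1' else '0')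

-- int(t, 2): left-to-right base-2 accumulation over the digit chars (exact on '0'/'1' strings)
def parseBin (l : List Char) : Int :=
  l.foldl (fun acc c => acc * 2 + (if c = '1' then 1 else 0)) 0

def yn2num_alt (s : String) : Int :=
  parseBin ('0' :: ynDigits s)

-- ===== PRECONDITION & SPEC =====
def Spec_yn2num (s : String) (out : Int) : Prop := out = yn2num_alt s
instance (s : String) (out : Int) : Decidable (Spec_yn2num s out) := by unfold Spec_yn2num; infer_instance

-- ===== CLAIM (what is proved, stated in full; the proofs are below) =====
def Claim_equal_yn2num : Prop := ∀ (s : String), Dom_yn2num s → Spec_yn2num s (yn2num s)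

-- ===== LEMMAS AND PROOFS =====

-- common value: little-endian binary value of the Y-mask
def ynVal : List Char → Int
  | [] => 0
  | c :: cs => (if c = 'Y' then 1 else 0) + 2 * ynVal cs

theorem yn2num_fold (l : List Char) (k : ℕ) (idx : Int) :
    (l.foldl
      (fun (st : Int × Int) t =>
        (st.1 + 1, if t = 'Y' then st.2 + 2 ^ st.1.toNat else st.2))
      ((k : Int), idx)).2 = idx + 2 ^ k * ynVal l := by
  induction l generalizing k idx with
  | nil => simp [ynVal]
  | cons c cs ih =>
    simp only [List.foldl_cons, ynVal]
    have h1 : ((k : Int) + 1) = ((k + 1 : ℕ) : Int) := by push_cast; ring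
    rw [h1, ih]
    split_ifs with hc <;> simp [Int.toNat_natCast, pow_succ] <;> ring

theorem parseBin_rev (l : List Char) (acc : Int) :
    (l.reverse.map (fun c => if c = 'Y' then '1' else '0')).foldl
      (fun acc c => acc * 2 + (if c = '1' then 1 else 0)) acc
      = acc * 2 ^ l.length + ynVal l := by
  induction l generalizing acc with
  | nil => simp [ynVal]
  | cons c cs ih =>
    simp only [List.reverse_cons, List.map_append, List.foldl_append, ih, List.map_cons,
      List.foldl_cons, List.length_cons, ynVal]
    by_cases hc : c = 'Y' <;> simp [hc, pow_succ] <;> ring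

-- ===== VERDICT (by name: the statement is the Claim_ definition above) =====
theorem yn2num_spec : Claim_equal_yn2num := by
  intro s _
  unfold Spec_yn2num yn2num yn2num_alt parseBin ynDigits
  have hA := yn2num_fold s.toList 0 0
  simp only [Nat.cast_zero] at hA
  rw [hA]
  simp only [List.foldl_cons]
  rw [parseBin_rev s.toList]
  simp
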